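-- pv_equiv track=rewrite | github.com/akazukin5151/koneko | koneko/pure.py | generate_orders
-- ===== SOURCE A (Python) =====
-- def generate_orders(total_pics: int, artists_count: int) -> 'list[int]':
--     """Returns the order of images to be displayed
--     images 0-29 are artist profile pics
--     images 30-119 are previews, 3 for each artist
--     so the valid order is:
--     0, 30, 31, 32, 1, 33, 34, 35, 2, 36, 37, 38, ...
--     a, p,  p,  p,  a, p,  p,  p,  a, ...
--     """
--     artist = tuple(range(artists_count))
--     prev = tuple(range(artists_count, total_pics))
--     order = []
--     a, p = 0, 0
--
--     for i in range(total_pics):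
--         if i % 4 == 0:
--             order.append(artist[a])
--             a += 1
--         else:
--             order.append(prev[p])
--             p += 1
--
--     return order
-- ===== SOURCE B (Python) =====
-- def generate_orders(total_pics: int, artists_count: int) -> 'list[int]':
--     """Build the full block table first -- for artist k the block is
--     [k, A+3k, A+3k+1, A+3k+2] computed by formula -- then slice it down
--     to total_pics. No interleaving counters, no modulo, no length checks."""
--     table = []
--     for k in range(artists_count):
--         table += [k,
--                   artists_count + 3 * k,
--                   artists_count + 3 * k + 1,
--                   artists_count + 3 * k + 2]
--     return table[:max(total_pics, 0)]
-- ===== Notes on version B (the rewrite author's own statement) =====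
-- stated objective: alternative
-- what changed: B builds the complete 4*artists_count block table up front (each artist's block [k, A+3k, A+3k+1, A+3k+2] computed by closed-form arithmetic, no preview counter, no i%4 test, no per-append truncation check) and then slices it to total_pics in a second stage, instead of A's single stateful pass over range(total_pics).
import Mathlib
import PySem

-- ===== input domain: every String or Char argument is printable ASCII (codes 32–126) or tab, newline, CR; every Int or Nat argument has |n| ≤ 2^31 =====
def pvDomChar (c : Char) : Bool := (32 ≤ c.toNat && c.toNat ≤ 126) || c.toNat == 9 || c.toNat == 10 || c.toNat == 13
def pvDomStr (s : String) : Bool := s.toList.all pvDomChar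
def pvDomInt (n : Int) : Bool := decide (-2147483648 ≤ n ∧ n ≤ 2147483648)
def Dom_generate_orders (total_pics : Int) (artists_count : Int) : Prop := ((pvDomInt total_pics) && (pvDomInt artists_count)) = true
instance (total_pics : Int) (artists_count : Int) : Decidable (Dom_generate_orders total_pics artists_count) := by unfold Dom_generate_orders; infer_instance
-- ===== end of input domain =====

-- B builds the complete block table (one arithmetic block [k, A+3k, A+3k+1, A+3k+2] per artist)
-- and slices it to total_pics, instead of A's single stateful interleaving pass; equal wherever A returns.

-- ===== PORT A =====
-- the for-loop of A, one step per index i; `none` = IndexError on a tuple access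
def genA_loop (artist prev : List Int) : List Int → Int → Int → List Int → Option (List Int)
  | [], _, _, order => some order
  | i :: rest, a, p, order =>
    if PySem.Int.mod i 4 == 0 then
      match PySem.List.pyGet? artist a with
      | some v => genA_loop artist prev rest (a + 1) p (order ++ [v])
      | none => none
    else
      match PySem.List.pyGet? prev p with
      | some v => genA_loop artist prev rest a (p + 1) (order ++ [v])
      | none => none

def generate_orders (total_pics : Int) (artists_count : Int) : List Int :=
  let artist := PySem.List.pyRange 0 artists_count 1
  let prev := PySem.List.pyRange artists_count total_pics 1
  match genA_loop artist prev (PySem.List.pyRange 0 total_pics 1) 0 0 [] with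
  | some order => order
  | none => []   -- unreachable under Pre_ (Python raises IndexError here)

-- ===== PORT B =====
-- table += [k, A+3k, A+3k+1, A+3k+2] for k in range(artists_count); then table[:max(total_pics,0)]
-- (List.take m = the Python slice [:m] exactly, since here m = max(total_pics,0) ≥ 0)
def generate_orders_alt (total_pics : Int) (artists_count : Int) : List Int :=
  let table := (PySem.List.pyRange 0 artists_count 1).foldl
    (fun acc k => acc ++ [k, artists_count + 3 * k, artists_count + 3 * k + 1,
                          artists_count + 3 * k + 2]) []
  table.take (max total_pics 0).toNat

-- ===== PRECONDITION & SPEC =====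
-- Pre_: exactly the inputs on which A returns; elsewhere A raises IndexError
-- (a tuple runs out, since artists_count ≠ ceil(total_pics/4)).
def Pre_generate_orders (total_pics : Int) (artists_count : Int) : Prop :=
  total_pics ≤ 0 ∨ (total_pics = 1 ∧ 1 ≤ artists_count) ∨
    (2 ≤ total_pics ∧ 4 * artists_count - 3 ≤ total_pics ∧ total_pics ≤ 4 * artists_count)
instance (total_pics : Int) (artists_count : Int) : Decidable (Pre_generate_orders total_pics artists_count) := by unfold Pre_generate_orders; infer_instance

def pvWitness_generate_orders : Int × Int := (8, 2)

def Spec_generate_orders (total_pics : Int) (artists_count : Int) (out : List Int) : Prop := out = generate_orders_alt total_pics artists_count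
instance (total_pics : Int) (artists_count : Int) (out : List Int) : Decidable (Spec_generate_orders total_pics artists_count out) := by unfold Spec_generate_orders; infer_instance

-- ===== CLAIM (what is proved, stated in full; the proofs are below) =====
def Claim_equal_generate_orders : Prop := ∀ (total_pics : Int) (artists_count : Int), Dom_generate_orders total_pics artists_count → Pre_generate_orders total_pics artists_count → Spec_generate_orders total_pics artists_count (generate_orders total_pics artists_count)

-- ===== LEMMAS AND PROOFS =====

-- proof-side gadget: the interleaved stream A produces, as a phase machine
-- (n = elements still to emit; ph = preview emissions left in the current block)
def genB_loop : Nat → Nat → Int → Int → List Int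
  | 0, _, _, _ => []
  | Nat.succ n, 0, a, p => a :: genB_loop n 3 (a + 1) p
  | Nat.succ n, Nat.succ k, a, p => p :: genB_loop n k a (p + 1)

theorem pyGet?_pyRange_one (lo hi k : Int) (h0 : 0 ≤ k) (h1 : k < hi - lo) :
    PySem.List.pyGet? (PySem.List.pyRange lo hi 1) k = some (lo + k) := by
  rw [PySem.List.pyGet?_of_nonneg _ h0, PySem.List.pyRange_one]
  rw [List.getElem?_map, List.getElem?_range (by omega)]
  simp; omega

-- Main invariant: at loop index i (0 ≤ i ≤ T) the A-loop state is (a, p) with a = ⌈i/4⌉,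
-- p = i - a, the phase ph = (4 - i % 4) % 4, and A's remaining loop equals the phase machine.
theorem genA_genB (T A : Int)
    (hPre : (T = 1 ∧ 1 ≤ A) ∨ (2 ≤ T ∧ 4 * A - 3 ≤ T ∧ T ≤ 4 * A)) :
    ∀ (n : Nat) (i a p : Int) (ph : Nat) (order : List Int),
      (n : Int) = T - i → 0 ≤ i → i ≤ T →
      4 * a - 4 < i → i ≤ 4 * a → p = i - a →
      (ph : Int) = (4 - i % 4) % 4 →
      genA_loop (PySem.List.pyRange 0 A 1) (PySem.List.pyRange A T 1)
          (PySem.List.pyRange i T 1) a p order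
        = some (order ++ genB_loop n ph a (A + p)) := by
  intro n
  induction n with
  | zero =>
    intro i a p ph order hn h0 hT _ _ _ _
    have hi : i = T := by omega
    rw [hi, PySem.List.pyRange_one_eq_nil (le_refl T)]
    simp [genA_loop, genB_loop]
  | succ n ih =>
    intro i a p ph order hn h0 hT ha1 ha2 hp hph
    have hiT : i < T := by omega
    rw [PySem.List.pyRange_one_cons hiT]
    have hmod : i % 4 = 0 ∨ i % 4 = 1 ∨ i % 4 = 2 ∨ i % 4 = 3 := by omega
    rcases hmod with h4 | h4 | h4 | h4
    · -- artist step: i = 4a, append a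
      have hia : i = 4 * a := by omega
      have hph0 : ph = 0 := by omega
      simp only [genA_loop, PySem.Int.mod_eq_emod_of_pos (by omega : (0:Int) < 4), h4]
      norm_num
      rw [pyGet?_pyRange_one 0 A a (by omega) (by omega)]
      simp only [zero_add]
      rw [ih (i + 1) (a + 1) p 3 (order ++ [a]) (by omega) (by omega) (by omega)
            (by omega) (by omega) (by omega) (by omega)]
      rw [hph0]
      simp [genB_loop, List.append_assoc]
    all_goals
    · -- preview step: append A + p
      simp only [genA_loop, PySem.Int.mod_eq_emod_of_pos (by omega : (0:Int) < 4), h4]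
      norm_num
      rw [pyGet?_pyRange_one A T p (by omega) (by omega)]
      dsimp only
      rw [ih (i + 1) a (p + 1) (ph - 1) (order ++ [A + p]) (by omega) (by omega) (by omega)
            (by omega) (by omega) (by omega) (by omega)]
      have hph' : ∃ m, ph = m + 1 := ⟨ph - 1, by omega⟩
      obtain ⟨m, rfl⟩ := hph'
      simp [genB_loop, List.append_assoc, add_assoc]

-- the phase machine is the truncated block table
theorem genB_take (A : Int) :
    ∀ (m : Nat) (a : Int) (n : Nat), n ≤ 4 * m →
      genB_loop n 0 a (A + 3 * a)
        = ((PySem.List.pyRange a (a + m) 1).flatMap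
            (fun k => [k, A + 3 * k, A + 3 * k + 1, A + 3 * k + 2])).take n := by
  intro m
  induction m with
  | zero =>
    intro a n hn
    have : n = 0 := by omega
    subst this
    simp [genB_loop]
  | succ m ih =>
    intro a n hn
    rw [PySem.List.pyRange_one_cons (by push_cast; omega)]
    rw [List.flatMap_cons]
    match n with
    | 0 => simp [genB_loop]
    | 1 => simp [genB_loop]
    | 2 => simp [genB_loop]
    | 3 => simp [genB_loop]
    | (n + 4) =>
      show genB_loop (n + 4) 0 a (A + 3 * a) = _
      simp only [genB_loop]
      have heq : A + 3 * a + 1 + 1 + 1 = A + 3 * (a + 1) := by ring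
      rw [heq, ih (a + 1) n (by omega)]
      have hrange : a + ((m + 1 : Nat) : Int) = (a + 1) + (m : Int) := by push_cast; ring
      rw [hrange]
      simp
      omega

-- ===== VERDICT (by name: the statement is the Claim_ definition above) =====
theorem generate_orders_spec : Claim_equal_generate_orders := by
  intro T A _ hPre
  unfold Spec_generate_orders generate_orders generate_orders_alt
  rw [PySem.List.foldl_append_eq_flatMap]
  rcases hPre with h | h
  · rw [PySem.List.pyRange_one_eq_nil (show T ≤ 0 from h)]
    have : (max T 0).toNat = 0 := by omega
    simp [genA_loop, this]
  · have hT : 0 < T := by omega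
    have hA : 0 < A := by omega
    have hmain := genA_genB T A h T.toNat 0 0 0 0 [] (by omega) (by omega) (by omega)
      (by omega) (by omega) (by omega) (by simp)
    simp only [hmain]
    have hbt := genB_take A A.toNat 0 T.toNat (by omega)
    simp only [zero_add] at hbt ⊢
    rw [show A + 3 * (0:Int) = A by ring] at hbt
    rw [show ((A.toNat : Int)) = A by omega] at hbt
    simp [hbt]
    congr 1
    omega
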